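-- pv_equiv track=rewrite | github.com/CPS-research-group/dtsemnet | dtsemnet/agents/dt/completeDT.py | generate_complete_binary_tree
-- ===== SOURCE A (Python) =====
-- import math
--
-- def generate_complete_binary_tree(num_leaf, dim_out):
--     leaf_action = [0] * dim_out #info: number of controllers is same as number of leaf nodes
--     height = math.ceil(math.log2(num_leaf))
--     leaf_nodes_lists = []
--     stack = [(0, [], [])]
--
--     controller_num = 0
--
--     while stack:
--         node, left_parents, right_parents = stack.pop()
--
--         left_child = 2 * node + 1
--         right_child = 2 * node + 2
--
--         if len(left_parents) + len(right_parents) >= height:  # Leaf node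
--             leaf_act = leaf_action.copy()
--             leaf_act[controller_num] = 1
--             controller_num += 1
--             if controller_num == dim_out:
--                 controller_num = 0
--             leaf_nodes_lists.append([left_parents, right_parents, leaf_act])
--         else:
--             stack.append(
--                 (right_child, left_parents.copy(), right_parents + [node]))
--             stack.append(
--                 (left_child, left_parents + [node], right_parents.copy()))
--
--     assert len(leaf_nodes_lists) == num_leaf, 'The number of leaf nodes is not correct'
--     return leaf_nodes_lists
-- ===== SOURCE B (Python) =====
-- def generate_complete_binary_tree(num_leaf, dim_out):
--     # closed-form per-leaf construction: leaf i's ancestor path is read off the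
--     # binary digits of i (MSB first), and its one-hot index is i % dim_out
--     height = (num_leaf - 1).bit_length()
--     assert num_leaf == 1 << height, 'The number of leaf nodes is not correct'
--     leaves = []
--     for i in range(num_leaf):
--         node, left_parents, right_parents = 0, [], []
--         for k in range(height - 1, -1, -1):
--             if (i // (2 ** k)) % 2 == 1:
--                 right_parents.append(node)
--                 node = 2 * node + 2
--             else:
--                 left_parents.append(node)
--                 node = 2 * node + 1
--         leaf_act = [0] * dim_out
--         leaf_act[i % dim_out] = 1
--         leaves.append([left_parents, right_parents, leaf_act])
--     return leaves
-- ===== Notes on version B (the rewrite author's own statement) =====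
-- stated objective: alternative
-- what changed: Replaces the explicit-stack DFS with a mutating cyclic controller counter by a direct per-leaf closed form: leaf i's ancestor path is decoded from the binary digits of i (MSB first) and its one-hot index is i % dim_out.
import Mathlib
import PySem

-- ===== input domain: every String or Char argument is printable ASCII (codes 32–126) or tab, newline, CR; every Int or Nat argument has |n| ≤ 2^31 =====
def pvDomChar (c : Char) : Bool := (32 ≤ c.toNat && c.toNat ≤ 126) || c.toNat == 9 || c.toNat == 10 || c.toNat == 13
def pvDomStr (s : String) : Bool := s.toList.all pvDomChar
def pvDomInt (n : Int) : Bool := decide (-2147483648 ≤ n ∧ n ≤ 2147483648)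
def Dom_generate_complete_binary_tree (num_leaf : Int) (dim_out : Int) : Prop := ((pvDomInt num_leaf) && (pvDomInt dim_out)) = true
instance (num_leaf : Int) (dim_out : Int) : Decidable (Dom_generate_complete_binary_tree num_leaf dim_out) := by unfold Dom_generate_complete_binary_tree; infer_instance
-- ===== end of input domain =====

-- B replaces the stack DFS (with its shared cyclic controller counter) by a direct
-- per-leaf closed form: leaf i's ancestor path is read off the binary digits of i
-- (MSB first) and its one-hot index is i % dim_out.  Same cost, different algorithm.

-- ===== PORT A =====
-- the while-stack loop of A; fuel only makes the same computation total (it is chosen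
-- large enough to never run out on inputs admitted by Pre_)
def pvAloop (dim_out height : Int) :
    Nat → List (Int × List Int × List Int) → Int → List (List (List Int)) → List (List (List Int))
  | 0, _, _, acc => acc
  | _ + 1, [], _, acc => acc
  | fuel + 1, (node, lp, rp) :: rest, cnt, acc =>
    if height ≤ (lp.length : Int) + (rp.length : Int) then
      -- leaf_act = leaf_action.copy(); leaf_act[controller_num] = 1  (in range under Pre_)
      let leaf_act := PySem.List.pySetD (List.replicate dim_out.toNat 0) cnt 1
      let cnt' := if cnt + 1 = dim_out then 0 else cnt + 1
      pvAloop dim_out height fuel rest cnt' (acc ++ [[lp, rp, leaf_act]])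
    else
      -- push right child then left child; top of stack is the list head
      pvAloop dim_out height fuel
        ((2 * node + 1, lp ++ [node], rp) :: (2 * node + 2, lp, rp ++ [node]) :: rest) cnt acc

def generate_complete_binary_tree (num_leaf : Int) (dim_out : Int) : List (List (List Int)) :=
  -- math.ceil(math.log2(num_leaf)) = Nat.clog 2 num_leaf: exact for 1 ≤ num_leaf ≤ 2^31
  -- (float log2 cannot cross an integer boundary there); num_leaf ≤ 0 raises ValueError (outside Pre_)
  pvAloop dim_out ((Nat.clog 2 num_leaf.toNat : Nat) : Int)
    (2 ^ (Nat.clog 2 num_leaf.toNat + 1)) [(0, [], [])] 0 []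

-- ===== PORT B =====
def generate_complete_binary_tree_alt (num_leaf : Int) (dim_out : Int) : List (List (List Int)) :=
  let height : Int := (PySem.Int.bitLength (num_leaf - 1) : Int)  -- (num_leaf-1).bit_length()
  -- assert num_leaf == 1 << height: raises exactly outside Pre_; no-op on admitted inputs
  (PySem.List.pyRange 0 num_leaf 1).foldl (fun leaves i =>
    let s := (PySem.List.pyRange (height - 1) (-1) (-1)).foldl
      (fun (st : Int × List Int × List Int) k =>
        -- 2 ** k : k ≥ 0 throughout this range
        if PySem.Int.mod (PySem.Int.floordiv i (2 ^ k.toNat)) 2 = 1 then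
          (2 * st.1 + 2, st.2.1, st.2.2 ++ [st.1])
        else
          (2 * st.1 + 1, st.2.1 ++ [st.1], st.2.2)) (0, [], [])
    leaves ++ [[s.2.1, s.2.2,
      PySem.List.pySetD (List.replicate dim_out.toNat 0) (PySem.Int.mod i dim_out) 1]]) []

-- ===== PRECONDITION & SPEC =====
-- Pre_ is exactly where the Python A returns: num_leaf must be a positive power of two
-- (otherwise math.log2 raises ValueError, or the final assert fails) and dim_out ≥ 1
-- (otherwise leaf_act[controller_num] raises IndexError).
def Pre_generate_complete_binary_tree (num_leaf : Int) (dim_out : Int) : Prop :=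
  1 ≤ dim_out ∧ 0 < num_leaf ∧ num_leaf = ((2 ^ Nat.clog 2 num_leaf.toNat : Nat) : Int)
instance (num_leaf : Int) (dim_out : Int) : Decidable (Pre_generate_complete_binary_tree num_leaf dim_out) := by
  unfold Pre_generate_complete_binary_tree; infer_instance
def pvWitness_generate_complete_binary_tree : Int × Int := (4, 3)

def Spec_generate_complete_binary_tree (num_leaf : Int) (dim_out : Int) (out : List (List (List Int))) : Prop := out = generate_complete_binary_tree_alt num_leaf dim_out
instance (num_leaf : Int) (dim_out : Int) (out : List (List (List Int))) : Decidable (Spec_generate_complete_binary_tree num_leaf dim_out out) := by unfold Spec_generate_complete_binary_tree; infer_instance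

-- ===== CLAIM (what is proved, stated in full; the proofs are below) =====
def Claim_equal_generate_complete_binary_tree : Prop := ∀ (num_leaf : Int) (dim_out : Int), Dom_generate_complete_binary_tree num_leaf dim_out → Pre_generate_complete_binary_tree num_leaf dim_out → Spec_generate_complete_binary_tree num_leaf dim_out (generate_complete_binary_tree num_leaf dim_out)

-- ===== LEMMAS AND PROOFS =====

-- the one-hot action list a leaf with running index j receives (both sides produce this)
def pvOneHot (d j : Int) : List Int :=
  PySem.List.pySetD (List.replicate d.toNat 0) (PySem.Int.mod j d) 1

-- the leaves of the complete subtree rooted at `node` with `r` levels below it,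
-- ancestors `lp`/`rp`, first running leaf index `j`, in left-to-right order
def pvEmit (d : Int) : Nat → Int → List Int → List Int → Int → List (List (List Int))
  | 0, _, lp, rp, j => [[lp, rp, pvOneHot d j]]
  | r + 1, node, lp, rp, j =>
    pvEmit d r (2 * node + 1) (lp ++ [node]) rp j ++
      pvEmit d r (2 * node + 2) lp (rp ++ [node]) (j + 2 ^ r)

-- counter step: A's wrap-at-dim_out counter realises j ↦ j % d
lemma pvCnt_step (d j : Int) (hd : 1 ≤ d) :
    (if PySem.Int.mod j d + 1 = d then 0 else PySem.Int.mod j d + 1) = PySem.Int.mod (j + 1) d := by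
  have h0 : (0 : Int) < d := by omega
  simp only [PySem.Int.mod_eq_emod_of_pos h0]
  have h2 : (j + 1) % d = (j % d + 1) % d := by
    conv_lhs => rw [show j + 1 = (j % d + 1) + d * (j / d) by
      have := Int.mul_ediv_add_emod j d; ring_nf; omega]
    simp [Int.add_mul_emod_self_left]
  have h3 := Int.emod_nonneg j (by omega : d ≠ 0)
  have h4 := Int.emod_lt_of_pos j h0
  rw [h2]
  split_ifs with h
  · rw [h]; simp
  · have h5 := Int.emod_eq_of_lt (a := j % d + 1) (b := d) (by omega) (by omega)
    omega

-- A's loop consumes exactly 2^(r+1)-1 fuel on a subtree item and appends its leaves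
lemma pvAloop_emit (d h : Int) (hd : 1 ≤ d) :
    ∀ (r : Nat) (node : Int) (lp rp : List Int) (rest : List (Int × List Int × List Int))
      (f : Nat) (j : Int) (acc : List (List (List Int))),
      ((lp.length : Int) + (rp.length : Int) + (r : Int) = h) →
      pvAloop d h (f + (2 ^ (r + 1) - 1)) ((node, lp, rp) :: rest) (PySem.Int.mod j d) acc
        = pvAloop d h f rest (PySem.Int.mod (j + 2 ^ r) d) (acc ++ pvEmit d r node lp rp j) := by
  intro r
  induction r with
  | zero =>
    intro node lp rp rest f j acc hdep
    have hcond : h ≤ (lp.length : Int) + (rp.length : Int) := by push_cast at hdep; omega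
    show pvAloop d h (f + 1) ((node, lp, rp) :: rest) (PySem.Int.mod j d) acc = _
    rw [pvAloop]
    simp only [if_pos hcond]
    rw [pvCnt_step d j hd]
    rfl
  | succ r ih =>
    intro node lp rp rest f j acc hdep
    have hcond : ¬ h ≤ (lp.length : Int) + (rp.length : Int) := by push_cast at hdep; omega
    have h1 : 1 ≤ 2 ^ (r + 1) := Nat.one_le_two_pow
    have hf : f + (2 ^ (r + 1 + 1) - 1)
        = (f + (2 ^ (r + 1) - 1) + (2 ^ (r + 1) - 1)) + 1 := by
      have : 2 ^ (r + 1 + 1) = 2 ^ (r + 1) + 2 ^ (r + 1) := by rw [pow_succ]; ring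
      omega
    rw [hf, pvAloop]
    simp only [if_neg hcond]
    rw [ih (2 * node + 1) (lp ++ [node]) rp _ _ j acc
      (by simp only [List.length_append, List.length_cons, List.length_nil]; push_cast at hdep ⊢; omega)]
    rw [ih (2 * node + 2) lp (rp ++ [node]) rest f (j + 2 ^ r) _
      (by simp only [List.length_append, List.length_cons, List.length_nil]; push_cast at hdep ⊢; omega)]
    rw [pvEmit]
    rw [List.append_assoc]
    congr 2
    push_cast [pow_succ]
    ring

-- fuel ≥ 1 with empty stack returns the accumulator
lemma pvAloop_nil (d h : Int) (f : Nat) (cnt : Int) (acc : List (List (List Int))) :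
    pvAloop d h (f + 1) [] cnt acc = acc := by rw [pvAloop]

-- A computes pvEmit at the root
lemma pvA_eq_emit (n d : Int) (hd : 1 ≤ d) :
    generate_complete_binary_tree n d
      = pvEmit d (Nat.clog 2 n.toNat) 0 [] [] 0 := by
  unfold generate_complete_binary_tree
  have h1 : 1 ≤ 2 ^ (Nat.clog 2 n.toNat + 1) := Nat.one_le_two_pow
  rw [show 2 ^ (Nat.clog 2 n.toNat + 1) = 1 + (2 ^ (Nat.clog 2 n.toNat + 1) - 1) by omega]
  have hmod0 : PySem.Int.mod 0 d = 0 := by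
    rw [PySem.Int.mod_eq_emod_of_pos (by omega)]; simp
  have h2 := pvAloop_emit d ((Nat.clog 2 n.toNat : Nat) : Int) hd (Nat.clog 2 n.toNat) 0 [] [] [] 1 0 [] (by simp)
  rw [hmod0] at h2
  rw [h2]
  rw [show (1 : Nat) = 0 + 1 from rfl, pvAloop_nil]
  simp

-- B's inner loop: one bit-test step
def pvStep (i : Int) (st : Int × List Int × List Int) (k : Int) : Int × List Int × List Int :=
  if PySem.Int.mod (PySem.Int.floordiv i (2 ^ k.toNat)) 2 = 1 then
    (2 * st.1 + 2, st.2.1, st.2.2 ++ [st.1])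
  else
    (2 * st.1 + 1, st.2.1 ++ [st.1], st.2.2)

-- B's inner loop over bits r-1 … 0 of i
def pvBits (r : Nat) (node : Int) (lp rp : List Int) (i : Int) : Int × List Int × List Int :=
  (PySem.List.pyRange ((r : Int) - 1) (-1) (-1)).foldl (pvStep i) (node, lp, rp)

lemma pvBits_zero (node : Int) (lp rp : List Int) (i : Int) :
    pvBits 0 node lp rp i = (node, lp, rp) := by
  unfold pvBits
  rw [PySem.List.pyRange_neg_one_eq_nil (by norm_num)]
  rfl

lemma pvBits_succ (r : Nat) (node : Int) (lp rp : List Int) (i : Int) :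
    pvBits (r + 1) node lp rp i
      = (if PySem.Int.mod (PySem.Int.floordiv i (2 ^ r)) 2 = 1 then
          pvBits r (2 * node + 2) lp (rp ++ [node]) i
        else
          pvBits r (2 * node + 1) (lp ++ [node]) rp i) := by
  unfold pvBits
  rw [show ((r + 1 : Nat) : Int) - 1 = (r : Int) by push_cast; ring]
  rw [PySem.List.pyRange_neg_one_cons (by omega)]
  rw [List.foldl_cons]
  unfold pvStep
  rw [show ((r : Int)).toNat = r by simp]
  split_ifs <;> rfl

-- the inner loop only looks at bits 0 … r-1 of i
lemma pvBits_congr (r : Nat) :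
    ∀ (node : Int) (lp rp : List Int) (i₁ i₂ : Int),
      (∀ k : Nat, k < r →
        PySem.Int.mod (PySem.Int.floordiv i₁ (2 ^ k)) 2
          = PySem.Int.mod (PySem.Int.floordiv i₂ (2 ^ k)) 2) →
      pvBits r node lp rp i₁ = pvBits r node lp rp i₂ := by
  induction r with
  | zero => intro node lp rp i₁ i₂ _; rw [pvBits_zero, pvBits_zero]
  | succ r ih =>
    intro node lp rp i₁ i₂ hb
    rw [pvBits_succ, pvBits_succ, hb r (by omega)]
    split_ifs
    · exact ih _ _ _ _ _ (fun k hk => hb k (by omega))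
    · exact ih _ _ _ _ _ (fun k hk => hb k (by omega))

-- bit r of i is 0 when 0 ≤ i < 2^r
lemma pvBit_low (r : Nat) (i : Int) (h0 : 0 ≤ i) (h1 : i < 2 ^ r) :
    PySem.Int.mod (PySem.Int.floordiv i (2 ^ r)) 2 = 0 := by
  have hp : (0 : Int) < 2 ^ r := by positivity
  rw [PySem.Int.floordiv_eq_ediv_of_pos hp, Int.ediv_eq_zero_of_lt h0 h1]
  rw [PySem.Int.mod_eq_emod_of_pos (by norm_num)]
  decide

-- bit r of 2^r + i is 1 when 0 ≤ i < 2^r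
lemma pvBit_high (r : Nat) (i : Int) (h0 : 0 ≤ i) (h1 : i < 2 ^ r) :
    PySem.Int.mod (PySem.Int.floordiv (2 ^ r + i) (2 ^ r)) 2 = 1 := by
  have hp : (0 : Int) < 2 ^ r := by positivity
  rw [PySem.Int.floordiv_eq_ediv_of_pos hp]
  rw [show (2 : Int) ^ r + i = i + 2 ^ r * 1 by ring]
  rw [Int.add_mul_ediv_left i 1 (by omega), Int.ediv_eq_zero_of_lt h0 h1]
  rw [PySem.Int.mod_eq_emod_of_pos (by norm_num)]
  decide

-- bits below r of 2^r + i agree with those of i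
lemma pvBit_lower (r k : Nat) (i : Int) (hk : k < r) :
    PySem.Int.mod (PySem.Int.floordiv (2 ^ r + i) (2 ^ k)) 2
      = PySem.Int.mod (PySem.Int.floordiv i (2 ^ k)) 2 := by
  have hp : (0 : Int) < 2 ^ k := by positivity
  have hkr : (2 : Int) ^ r = 2 ^ k * 2 ^ (r - k) := by
    rw [← pow_add]; congr 1; omega
  rw [PySem.Int.floordiv_eq_ediv_of_pos hp, PySem.Int.floordiv_eq_ediv_of_pos hp]
  rw [PySem.Int.mod_eq_emod_of_pos (by norm_num : (0 : Int) < 2),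
    PySem.Int.mod_eq_emod_of_pos (by norm_num : (0 : Int) < 2)]
  rw [show (2 : Int) ^ r + i = i + 2 ^ k * 2 ^ (r - k) by rw [← hkr]; ring]
  rw [Int.add_mul_ediv_left i (2 ^ (r - k)) (by omega)]
  have he : (2 : Int) ^ (r - k) = 2 * 2 ^ (r - k - 1) := by
    rw [← pow_succ']; congr 1; omega
  generalize i / (2 : Int) ^ k = x
  omega

-- pvEmit is the per-leaf closed form over leaf indices
lemma pvEmit_map (d : Int) (r : Nat) :
    ∀ (node : Int) (lp rp : List Int) (j : Int),
      pvEmit d r node lp rp j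
        = (List.range (2 ^ r)).map (fun i : Nat =>
            [(pvBits r node lp rp (i : Int)).2.1, (pvBits r node lp rp (i : Int)).2.2,
              pvOneHot d (j + (i : Int))]) := by
  induction r with
  | zero =>
    intro node lp rp j
    simp [pvEmit, pvBits_zero]
  | succ r ih =>
    intro node lp rp j
    rw [pvEmit, ih, ih]
    rw [show 2 ^ (r + 1) = 2 ^ r + 2 ^ r by rw [pow_succ]; ring]
    rw [List.range_add, List.map_append, List.map_map]
    congr 1
    · apply List.map_congr_left
      intro i hi
      rw [List.mem_range] at hi
      have hlt : (i : Int) < 2 ^ r := by exact_mod_cast hi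
      rw [pvBits_succ, pvBit_low r (i : Int) (by positivity) hlt]
      norm_num
    · apply List.map_congr_left
      intro i hi
      rw [List.mem_range] at hi
      have hlt : (i : Int) < 2 ^ r := by exact_mod_cast hi
      simp only [Function.comp]
      have hcast : ((2 ^ r + i : Nat) : Int) = 2 ^ r + (i : Int) := by push_cast; ring
      rw [hcast, pvBits_succ, pvBit_high r (i : Int) (by positivity) hlt]
      rw [if_pos rfl]
      rw [pvBits_congr r _ _ _ (2 ^ r + (i : Int)) (i : Int)
        (fun k hk => pvBit_lower r k (i : Int) hk)]
      rw [show j + (2 ^ r + (i : Int)) = j + 2 ^ r + (i : Int) by ring]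

-- a foldl that only appends one element per item is a map
lemma pvFoldl_append_map {α : Type} (f : List α → Int → List α) (g : Int → α)
    (hf : ∀ a i, f a i = a ++ [g i]) :
    ∀ (xs : List Int) (acc : List α), xs.foldl f acc = acc ++ xs.map g := by
  intro xs
  induction xs with
  | nil => intro acc; simp
  | cons x xs ih => intro acc; rw [List.foldl_cons, hf, ih, List.map_cons]; simp

-- B's leaf for index i (this is what its loop body appends)
def pvLeafB (hB : Nat) (d i : Int) : List (List Int) :=
  [(pvBits hB 0 [] [] i).2.1, (pvBits hB 0 [] [] i).2.2,
    PySem.List.pySetD (List.replicate d.toNat 0) (PySem.Int.mod i d) 1]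

lemma pvB_eq_map (n d : Int) :
    generate_complete_binary_tree_alt n d
      = (PySem.List.pyRange 0 n 1).map (pvLeafB (PySem.Int.bitLength (n - 1)) d) := by
  simp only [generate_complete_binary_tree_alt]
  have h := pvFoldl_append_map
    (fun (leaves : List (List (List Int))) (i : Int) =>
      leaves ++ [pvLeafB (PySem.Int.bitLength (n - 1)) d i])
    (pvLeafB (PySem.Int.bitLength (n - 1)) d) (fun a i => rfl)
    (PySem.List.pyRange 0 n 1) []
  rw [List.nil_append] at h
  exact h

-- (num_leaf - 1).bit_length() = ceil(log2 num_leaf) on powers of two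
lemma pvBitLength_pow_sub_one (h : Nat) :
    PySem.Int.bitLength (((2 ^ h : Nat) : Int) - 1) = h := by
  cases h with
  | zero => decide
  | succ h =>
    have h2 : 2 ≤ 2 ^ (h + 1) := by
      calc 2 = 2 ^ 1 := rfl
      _ ≤ 2 ^ (h + 1) := Nat.pow_le_pow_right (by norm_num) (by omega)
    set m : Int := ((2 ^ (h + 1) : Nat) : Int) - 1 with hm
    have hne : m ≠ 0 := by rw [hm]; omega
    have habs : m.natAbs = 2 ^ (h + 1) - 1 := by rw [hm]; omega
    have hlt := PySem.Int.lt_two_pow_bitLength m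
    have hge := PySem.Int.two_pow_bitLength_le m hne
    rw [habs] at hlt hge
    set bl := PySem.Int.bitLength m with hbl
    have hle1 : h + 1 ≤ bl := by
      by_contra hcon
      have hlt2 : bl < h + 1 := by omega
      have := Nat.pow_lt_pow_right (a := 2) (by norm_num) hlt2
      omega
    have hle2 : bl ≤ h + 1 := by
      by_contra hcon
      have hlt2 : h + 1 ≤ bl - 1 := by omega
      have := Nat.pow_le_pow_right (by norm_num : 0 < 2) hlt2
      omega
    omega

theorem generate_complete_binary_tree_spec : Claim_equal_generate_complete_binary_tree := by
  intro n d _ hpre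
  obtain ⟨hd, hn, hpow⟩ := hpre
  unfold Spec_generate_complete_binary_tree
  set hh := Nat.clog 2 n.toNat with hhh
  rw [pvA_eq_emit n d hd, pvB_eq_map n d]
  have hb : PySem.Int.bitLength (n - 1) = hh := by
    rw [show n - 1 = ((2 ^ hh : Nat) : Int) - 1 by omega]
    exact pvBitLength_pow_sub_one hh
  rw [hb]
  conv_rhs => rw [hpow]
  rw [PySem.List.pyRange_zero_natCast (2 ^ hh), List.map_map]
  rw [pvEmit_map d hh 0 [] [] 0]
  apply List.map_congr_left
  intro i _
  simp [pvLeafB, pvOneHot, Function.comp]
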